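-- pv_equiv track=rewrite | github.com/somnifex/MakeWiki.skills | src/makewiki_skills/verification/codebase_verifier.py | _command_matches
-- ===== SOURCE A (Python) =====
-- def _command_matches(claim: str, project_cmds: set[str]) -> bool:
--     """Return ``True`` when a documented command matches a known command."""
--     for known in project_cmds:
--         if claim == known:
--             return True
--         if claim.startswith(known) and (
--             len(claim) == len(known) or claim[len(known)] in (" ", "\t")
--         ):
--             return True
--         if known in claim.split()[0:1]:
--             return True
--     return False
-- ===== SOURCE B (Python) =====
-- def _command_matches(claim: str, project_cmds: set[str]) -> bool:
--     """Return ``True`` when a documented command matches a known command."""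
--     cmds = set(project_cmds)
--     candidates = {claim}
--     for i, ch in enumerate(claim):
--         if ch in (" ", "\t"):
--             candidates.add(claim[:i])
--     first = claim.split()[:1]
--     if first:
--         candidates.add(first[0])
--     return not candidates.isdisjoint(cmds)
-- ===== Notes on version B (the rewrite author's own statement) =====
-- stated objective: faster
-- what changed: Instead of scanning every known command and testing it as a prefix of the claim, B enumerates the claim's whitespace-bounded prefixes (plus the claim itself and its first token) in one pass over the claim and intersects this candidate set with the command set.
import Mathlib
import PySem

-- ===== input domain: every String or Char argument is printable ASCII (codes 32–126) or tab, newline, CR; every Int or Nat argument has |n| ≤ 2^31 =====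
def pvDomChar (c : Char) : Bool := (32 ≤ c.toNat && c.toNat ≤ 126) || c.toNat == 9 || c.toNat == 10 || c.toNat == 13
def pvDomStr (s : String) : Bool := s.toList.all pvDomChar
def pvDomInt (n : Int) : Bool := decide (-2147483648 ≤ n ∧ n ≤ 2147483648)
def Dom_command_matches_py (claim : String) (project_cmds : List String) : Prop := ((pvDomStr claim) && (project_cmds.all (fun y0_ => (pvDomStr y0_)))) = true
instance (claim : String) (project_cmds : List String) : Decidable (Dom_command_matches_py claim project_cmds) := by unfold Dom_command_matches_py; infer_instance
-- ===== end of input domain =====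

-- B replaces A's scan over every known command (each doing prefix work on `claim`) by one pass
-- over `claim` collecting its whitespace-bounded prefixes, checked against the command set.

-- ===== PORT A =====
-- body of A's for-loop: the three `if … : return True` tests applied to one known command
def pvCondA (claim : String) (known : String) : Bool :=
  (claim == known) ||
  (PySem.Str.startswith claim known &&
    (PySem.Str.len claim == PySem.Str.len known ||
      (match PySem.Str.pyGet? claim (PySem.Str.len known) with
       | some c => c == ' ' || c == '\t'
       | none => false))) ||
  (PySem.List.slice (PySem.Str.split₀ claim) (some 0) (some 1)).contains known

def command_matches_py (claim : String) (project_cmds : List String) : Bool :=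
  project_cmds.any (fun known => pvCondA claim known)

-- ===== PORT B =====
def command_matches_py_alt (claim : String) (project_cmds : List String) : Bool :=
  let cmds := PySem.Set.ofList project_cmds
  let candidates : PySem.Set String := PySem.Set.ofList [claim]
  let candidates := (PySem.List.enumerate claim.toList).foldl
    (fun s p => if p.2 == ' ' || p.2 == '\t'
                then PySem.Set.add s (PySem.Str.slice claim none (some p.1))
                else s) candidates
  let first := PySem.List.slice (PySem.Str.split₀ claim) none (some 1)
  let candidates := match first with
    | [] => candidates
    | t :: _ => PySem.Set.add candidates t
  !(PySem.Set.isdisjoint candidates cmds)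

-- ===== PRECONDITION & SPEC =====
def Spec_command_matches_py (claim : String) (project_cmds : List String) (out : Bool) : Prop := out = command_matches_py_alt claim project_cmds
instance (claim : String) (project_cmds : List String) (out : Bool) : Decidable (Spec_command_matches_py claim project_cmds out) := by unfold Spec_command_matches_py; infer_instance

-- ===== CLAIM (what is proved, stated in full; the proofs are below) =====
def Claim_equal_command_matches_py : Prop := ∀ (claim : String) (project_cmds : List String), Dom_command_matches_py claim project_cmds → Spec_command_matches_py claim project_cmds (command_matches_py claim project_cmds)

-- ===== LEMMAS AND PROOFS =====

-- membership in B's candidate-collecting fold over the characters of `claim`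
lemma pv_mem_fold (claim x : String) (l : List (Int × Char)) (init : PySem.Set String) :
    (x ∈ l.foldl (fun s p => if p.2 == ' ' || p.2 == '\t'
        then PySem.Set.add s (PySem.Str.slice claim none (some p.1)) else s) init) ↔
      (x ∈ init ∨ ∃ p ∈ l, (p.2 = ' ' ∨ p.2 = '\t') ∧ x = PySem.Str.slice claim none (some p.1)) := by
  induction l generalizing init with
  | nil => simp
  | cons q t ih =>
    simp only [List.foldl_cons, ih, List.mem_cons]
    by_cases hq : (q.2 == ' ' || q.2 == '\t') = true
    · have hq' : q.2 = ' ' ∨ q.2 = '\t' := by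
        rcases Bool.or_eq_true_iff.mp hq with h | h
        · exact Or.inl (by exact beq_iff_eq.mp h)
        · exact Or.inr (by exact beq_iff_eq.mp h)
      simp only [hq, if_true, PySem.Set.mem_add]
      constructor
      · rintro (⟨h | h⟩ | ⟨p, hp, hw, hx⟩)
        · exact Or.inl h
        · exact Or.inr ⟨q, Or.inl rfl, hq', h⟩
        · exact Or.inr ⟨p, Or.inr hp, hw, hx⟩
      · rintro (h | ⟨p, hp | hp, hw, hx⟩)
        · exact Or.inl (Or.inl h)
        · exact Or.inl (Or.inr (by rw [hp] at hx; exact hx))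
        · exact Or.inr ⟨p, hp, hw, hx⟩
    · have hq' : ¬ (q.2 = ' ' ∨ q.2 = '\t') := by
        intro h; apply hq
        rcases h with h | h <;> simp [h]
      simp only [hq]
      constructor
      · rintro (h | ⟨p, hp, hw, hx⟩)
        · exact Or.inl h
        · exact Or.inr ⟨p, Or.inr hp, hw, hx⟩
      · rintro (h | ⟨p, hp | hp, hw, hx⟩)
        · exact Or.inl h
        · exact absurd (by rw [hp] at hw; exact hw) hq'
        · exact Or.inr ⟨p, hp, hw, hx⟩

-- `known` is a prefix of `claim` followed by ' '/'\t'  ↔  `known` is `claim` cut at a blank position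
lemma pv_prefix_ws_iff (cl k : List Char) :
    (k <+: cl ∧ ∃ c, PySem.List.pyGet? cl ((k.length : Nat) : Int) = some c ∧ (c = ' ' ∨ c = '\t')) ↔
    ∃ i : Nat, ∃ h : i < cl.length, (cl[i] = ' ' ∨ cl[i] = '\t') ∧ k = cl.take i := by
  rw [PySem.List.pyGet?_natCast]
  constructor
  · rintro ⟨hp, c, hg, hc⟩
    have hlt : k.length < cl.length := by
      by_contra h
      rw [List.getElem?_eq_none (by omega)] at hg
      simp at hg
    refine ⟨k.length, hlt, ?_, List.prefix_iff_eq_take.mp hp⟩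
    have : cl[k.length] = c := by
      have := List.getElem?_eq_getElem hlt
      rw [this] at hg; exact (Option.some.injEq _ _).mp hg
    rw [this]; exact hc
  · rintro ⟨i, h, hc, hk⟩
    have hlen : k.length = i := by rw [hk]; simp [List.length_take]; omega
    refine ⟨by rw [hk]; exact List.take_prefix i cl, cl[i], ?_, ?_⟩
    · rw [hlen, List.getElem?_eq_getElem h]
    · exact hc

-- A's three tests on one known command  ↔  that command is one of B's candidates
lemma pv_cond_iff (claim k : String) :
    pvCondA claim k = true ↔
      (k = claim ∨
       (∃ p ∈ PySem.List.enumerate claim.toList 0, (p.2 = ' ' ∨ p.2 = '\t') ∧ k = PySem.Str.slice claim none (some p.1)) ∨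
       k ∈ (PySem.Str.split₀ claim).take 1) := by
  have hmatch : (match PySem.Str.pyGet? claim ((k.toList.length : Nat) : Int) with
       | some c => c == ' ' || c == '\t'
       | none => false) = true ↔
      ∃ c, PySem.List.pyGet? claim.toList ((k.toList.length : Nat) : Int) = some c ∧ (c = ' ' ∨ c = '\t') := by
    rw [PySem.Str.pyGet?_eq, PySem.Chars.pyGet?_eq_listPyGet?]
    cases h : PySem.List.pyGet? claim.toList ((k.toList.length : Nat) : Int) with
    | none => simp
    | some c => simp [beq_iff_eq]
  have hslice : PySem.List.slice (PySem.Str.split₀ claim) (some 0) (some 1) = (PySem.Str.split₀ claim).take 1 := by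
    rw [PySem.List.slice_zero_start, PySem.List.slice_to _ (by norm_num)]
    norm_num
  unfold pvCondA
  rw [hslice]
  simp only [Bool.or_eq_true, Bool.and_eq_true, beq_iff_eq,
    PySem.Str.startswith_eq, PySem.Chars.startswith_iff, PySem.Str.len_eq,
    List.contains_iff_mem, Nat.cast_inj, or_assoc]
  rw [hmatch]
  constructor
  · rintro (h | ⟨hp, hlen | hws⟩ | h)
    · exact Or.inl h.symm
    · exact Or.inl (String.toList_inj.mp (hp.eq_of_length (by omega)))
    · rcases (pv_prefix_ws_iff claim.toList k.toList).mp ⟨hp, hws⟩ with ⟨i, hi, hc, hk⟩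
      refine Or.inr (Or.inl ⟨((0 : Int) + i, claim.toList[i]), ?_, hc, ?_⟩)
      · rw [PySem.List.mem_enumerate_iff]
        exact ⟨i, hi, rfl⟩
      · apply String.toList_inj.mp
        rw [PySem.Str.toList_slice, PySem.Chars.slice_eq_listSlice]
        simp only [zero_add]
        rw [PySem.List.slice_to _ (by positivity)]
        simpa using hk
    · exact Or.inr (Or.inr h)
  · rintro (h | ⟨p, hp, hw, hk⟩ | h)
    · exact Or.inr (Or.inl ⟨by rw [h], Or.inl (by rw [h])⟩)
    · rw [PySem.List.mem_enumerate_iff] at hp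
      obtain ⟨i, hi, rfl⟩ := hp
      have hk' : k.toList = claim.toList.take i := by
        rw [← String.toList_inj] at hk
        rw [PySem.Str.toList_slice, PySem.Chars.slice_eq_listSlice] at hk
        simpa [PySem.List.slice_to _ (by positivity : (0:Int) ≤ 0 + (i:Int))] using hk
      have := (pv_prefix_ws_iff claim.toList k.toList).mpr ⟨i, hi, hw, hk'⟩
      exact Or.inr (Or.inl ⟨this.1, Or.inr this.2⟩)
    · exact Or.inr (Or.inr h)

-- membership in B's final candidate set, characterised by the three sources of candidates
lemma pv_mem_cands (claim x : String) :
    (x ∈ (match (PySem.Str.split₀ claim).take 1 with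
      | [] => (PySem.List.enumerate claim.toList).foldl
          (fun (s : PySem.Set String) (p : Int × Char) => if p.2 == ' ' || p.2 == '\t'
            then PySem.Set.add s (PySem.Str.slice claim none (some p.1)) else s)
          (PySem.Set.ofList [claim])
      | t :: _ => PySem.Set.add ((PySem.List.enumerate claim.toList).foldl
          (fun (s : PySem.Set String) (p : Int × Char) => if p.2 == ' ' || p.2 == '\t'
            then PySem.Set.add s (PySem.Str.slice claim none (some p.1)) else s)
          (PySem.Set.ofList [claim])) t)) ↔
    (x = claim ∨
     (∃ p ∈ PySem.List.enumerate claim.toList 0, (p.2 = ' ' ∨ p.2 = '\t') ∧ x = PySem.Str.slice claim none (some p.1)) ∨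
     x ∈ (PySem.Str.split₀ claim).take 1) := by
  cases hf : (PySem.Str.split₀ claim).take 1 with
  | nil =>
    simp only [pv_mem_fold, PySem.Set.mem_ofList, List.mem_singleton, List.not_mem_nil, or_false]
  | cons t ts =>
    have hts : ts = [] := by
      have h1 := congrArg List.length hf
      simp [List.length_take] at h1
      exact List.eq_nil_of_length_eq_zero (by omega)
    subst hts
    simp only [PySem.Set.mem_add, pv_mem_fold, PySem.Set.mem_ofList, List.mem_singleton]
    rw [or_assoc]

theorem pv_main (claim : String) (project_cmds : List String) :
    command_matches_py claim project_cmds = command_matches_py_alt claim project_cmds := by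
  rw [Bool.eq_iff_iff]
  have htake : PySem.List.slice (PySem.Str.split₀ claim) none (some 1) = (PySem.Str.split₀ claim).take 1 := by
    rw [PySem.List.slice_to _ (by norm_num)]; norm_num
  unfold command_matches_py command_matches_py_alt
  simp only [List.any_eq_true, htake, Bool.not_eq_true']
  rw [Bool.eq_false_iff, Ne, PySem.Set.isdisjoint_iff]
  push Not
  constructor
  · rintro ⟨k, hk, hc⟩
    exact ⟨k, (pv_mem_cands claim k).mpr ((pv_cond_iff claim k).mp hc), (PySem.Set.mem_ofList _ _).mpr hk⟩
  · rintro ⟨x, hx, hmem⟩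
    exact ⟨x, (PySem.Set.mem_ofList _ _).mp hmem, (pv_cond_iff claim x).mpr ((pv_mem_cands claim x).mp hx)⟩

-- ===== VERDICT (by name: the statement is the Claim_ definition above) =====
theorem command_matches_py_spec : Claim_equal_command_matches_py := by
  intro claim project_cmds _
  unfold Spec_command_matches_py
  exact pv_main claim project_cmds
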